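-- pv_equiv track=rewrite | github.com/vonvic/Advent-of-Code-2021 | 13/problem.py | __simulate_folding
-- ===== SOURCE A (Python) =====
-- def __get_reflection(point: tuple, fold: tuple):
--     """Return the reflection of `point` at the line specifed at `fold`."""
--     axis, position = fold
--     x, y = point
--     match axis:
--         case "x":
--             return (2 * position - x, y)
--         case "y":
--             return (x, 2 * position - y)
--         case _:
--             raise ValueError(f"Unknown axis: {axis}")
--
-- def __simulate_folding(points: list, folds: list):
--     """
--     Simulate folding of points defined by `folds` and return the points.
--
--     The folding is defined by finding the reflection of a point only on one
--     side.
--     """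
--     points = set(points)
--
--     for fold in folds:
--         axis, position = fold
--         new_points = set()  # gather new points after folding each point
--         for point in points:
--             x, y = point
--             new_point: tuple = point
--             match axis:
--                 case "x":
--                     if x > position:
--                         new_point = __get_reflection(point, fold)
--                 case "y":
--                     if y > position:
--                         new_point = __get_reflection(point, fold)
--                 case _:
--                     raise ValueError(f"Unknown axis: {axis}")
--             new_points.add(new_point)
--         points = new_points
--     return points
-- ===== SOURCE B (Python) =====
-- def __simulate_folding(points: list, folds: list):
--     """Fold each point through all the folds individually, collecting results.
--
--     Instead of rebuilding the whole point set after every fold, thread each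
--     point through all folds in order and add its final position to one set.
--     """
--     result = set()
--     for x, y in set(points):
--         for axis, position in folds:
--             if axis == "x":
--                 if x > position:
--                     x = 2 * position - x
--             elif axis == "y":
--                 if y > position:
--                     y = 2 * position - y
--             else:
--                 raise ValueError(f"Unknown axis: {axis}")
--         result.add((x, y))
--     return result
-- ===== Notes on version B (the rewrite author's own statement) =====
-- stated objective: simpler
-- what changed: B inverts the loop nesting: instead of rebuilding the whole point set fold by fold with intermediate dedup sets, each point is threaded through all folds in one inner pass and its final position is added to a single result set.
import Mathlib
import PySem

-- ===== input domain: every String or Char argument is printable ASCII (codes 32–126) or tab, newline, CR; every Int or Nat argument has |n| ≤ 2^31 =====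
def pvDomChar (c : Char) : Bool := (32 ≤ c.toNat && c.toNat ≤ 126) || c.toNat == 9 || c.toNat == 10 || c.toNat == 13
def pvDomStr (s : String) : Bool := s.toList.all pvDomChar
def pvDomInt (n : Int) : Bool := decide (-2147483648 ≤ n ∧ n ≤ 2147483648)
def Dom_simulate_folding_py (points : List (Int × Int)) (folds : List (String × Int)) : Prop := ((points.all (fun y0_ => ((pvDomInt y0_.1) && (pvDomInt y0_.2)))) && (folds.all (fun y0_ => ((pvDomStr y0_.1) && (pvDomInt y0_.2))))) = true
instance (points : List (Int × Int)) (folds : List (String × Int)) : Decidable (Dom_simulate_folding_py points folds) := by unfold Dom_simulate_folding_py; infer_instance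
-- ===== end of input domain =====

-- B inverts the loop nesting: each point is threaded through all folds once and added to one
-- result set, instead of rebuilding the whole set fold by fold. Equivalence of return values.

-- ===== PORT A =====
-- __get_reflection; the 'case _' raise is unreachable in A (callers check the axis first)
def pvGetReflection (point : Int × Int) (fold : String × Int) : Int × Int :=
  if fold.1 = "x" then (2 * fold.2 - point.1, point.2)
  else if fold.1 = "y" then (point.1, 2 * fold.2 - point.2)
  else point

def simulate_folding_py (points : List (Int × Int)) (folds : List (String × Int)) : List (Int × Int) :=
  folds.foldl (fun pts fold =>
      pts.foldl (fun new_points point =>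
          let new_point : Int × Int :=
            if fold.1 = "x" then (if point.1 > fold.2 then pvGetReflection point fold else point)
            else if fold.1 = "y" then (if point.2 > fold.2 then pvGetReflection point fold else point)
            else point  -- Python: raise ValueError (excluded by Pre_)
          PySem.Set.add new_points new_point)
        PySem.Set.empty)
    (PySem.Set.ofList points)

-- ===== PORT B =====
def pvThreadFolds (point : Int × Int) (folds : List (String × Int)) : Int × Int :=
  folds.foldl (fun xy f =>
    if f.1 = "x" then (if xy.1 > f.2 then (2 * f.2 - xy.1, xy.2) else xy)
    else if f.1 = "y" then (if xy.2 > f.2 then (xy.1, 2 * f.2 - xy.2) else xy)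
    else xy)  -- Python: raise ValueError (excluded by Pre_)
    point

def simulate_folding_py_alt (points : List (Int × Int)) (folds : List (String × Int)) : List (Int × Int) :=
  (PySem.Set.ofList points).foldl
    (fun result p => PySem.Set.add result (pvThreadFolds p folds)) PySem.Set.empty

-- ===== PRECONDITION & SPEC =====
-- Pre_ excludes exactly the inputs where Python A raises ValueError: a fold with an axis other
-- than "x"/"y" together with a non-empty point list (with no points the inner loop never runs).
def Pre_simulate_folding_py (points : List (Int × Int)) (folds : List (String × Int)) : Prop :=
  points = [] ∨ ∀ f ∈ folds, f.1 = "x" ∨ f.1 = "y"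
instance (points : List (Int × Int)) (folds : List (String × Int)) : Decidable (Pre_simulate_folding_py points folds) := by unfold Pre_simulate_folding_py; infer_instance

def pvWitness_simulate_folding_py : (List (Int × Int)) × (List (String × Int)) :=
  ([(1, 3), (4, 1), (1, 3)], [("x", 2), ("y", 2)])

def Spec_simulate_folding_py (points : List (Int × Int)) (folds : List (String × Int)) (out : List (Int × Int)) : Prop := out = simulate_folding_py_alt points folds
instance (points : List (Int × Int)) (folds : List (String × Int)) (out : List (Int × Int)) : Decidable (Spec_simulate_folding_py points folds out) := by unfold Spec_simulate_folding_py; infer_instance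

-- ===== CLAIM (what is proved, stated in full; the proofs are below) =====
def Claim_equal_simulate_folding_py : Prop := ∀ (points : List (Int × Int)) (folds : List (String × Int)), Dom_simulate_folding_py points folds → Pre_simulate_folding_py points folds → Spec_simulate_folding_py points folds (simulate_folding_py points folds)

-- ===== LEMMAS AND PROOFS =====

-- one fold step applied to a single point, as A computes it
def pvStepA (fold : String × Int) (point : Int × Int) : Int × Int :=
  if fold.1 = "x" then (if point.1 > fold.2 then pvGetReflection point fold else point)
  else if fold.1 = "y" then (if point.2 > fold.2 then pvGetReflection point fold else point)
  else point

theorem pvThread_cons (f : String × Int) (fs : List (String × Int)) (p : Int × Int) :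
    pvThreadFolds p (f :: fs) = pvThreadFolds (pvStepA f p) fs := by
  simp only [pvThreadFolds, List.foldl_cons, pvStepA, pvGetReflection]
  split_ifs <;> rfl

-- adding already-present images is a no-op
theorem pvAddAll_noop (g : (Int × Int) → (Int × Int)) :
    ∀ (t s : List (Int × Int)), (∀ x ∈ t, g x ∈ s) →
      t.foldl (fun acc p => PySem.Set.add acc (g p)) s = s := by
  intro t
  induction t with
  | nil => intro s _; rfl
  | cons x t ih =>
    intro s h
    simp only [List.foldl_cons]
    have hx : PySem.Set.add s (g x) = s := by
      simp [PySem.Set.add, h x (by simp)]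
    rw [hx]
    exact ih s (fun y hy => h y (by simp [hy]))

-- every Set.add only appends, so the start list is a prefix of the result
theorem pvFoldl_add_prefix : ∀ (l t : List (Int × Int)), ∃ r, l.foldl PySem.Set.add t = t ++ r := by
  intro l
  induction l with
  | nil => intro t; exact ⟨[], by simp⟩
  | cons x l ih =>
    intro t
    simp only [List.foldl_cons]
    by_cases hx : x ∈ t
    · have : PySem.Set.add t x = t := by simp [PySem.Set.add, hx]
      rw [this]; exact ih t
    · have : PySem.Set.add t x = t ++ [x] := by simp [PySem.Set.add, hx]
      rw [this]
      obtain ⟨r, hr⟩ := ih (t ++ [x])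
      exact ⟨x :: r, by simpa using hr⟩

-- deduplicating the source first does not change the built set
theorem pvFold_dedup (g : (Int × Int) → (Int × Int)) :
    ∀ (l t s : List (Int × Int)), (∀ x ∈ t, g x ∈ s) →
      (l.foldl PySem.Set.add t).foldl (fun acc p => PySem.Set.add acc (g p)) s =
        l.foldl (fun acc p => PySem.Set.add acc (g p)) s := by
  intro l
  induction l with
  | nil => intro t s h; exact pvAddAll_noop g t s h
  | cons x l ih =>
    intro t s h
    simp only [List.foldl_cons]
    by_cases hx : x ∈ t
    · have ht : PySem.Set.add t x = t := by simp [PySem.Set.add, hx]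
      have hs : PySem.Set.add s (g x) = s := by simp [PySem.Set.add, h x hx]
      rw [ht, hs]
      exact ih t s h
    · have ht : PySem.Set.add t x = t ++ [x] := by simp [PySem.Set.add, hx]
      rw [ht]
      have hsub : ∀ y ∈ t ++ [x], g y ∈ PySem.Set.add s (g x) := by
        intro y hy
        rcases List.mem_append.1 hy with hmem | heq
        · exact (PySem.Set.mem_add _ _ _).2 (Or.inl (h y hmem))
        · rcases List.mem_singleton.1 heq with rfl
          exact (PySem.Set.mem_add _ _ _).2 (Or.inr rfl)
      obtain ⟨r, hr⟩ := pvFoldl_add_prefix l (t ++ [x])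
      -- both sides reduce to a fold over r starting from add s (g x)
      have hL : ((t ++ [x]) ++ r).foldl (fun acc p => PySem.Set.add acc (g p)) s
          = r.foldl (fun acc p => PySem.Set.add acc (g p)) (PySem.Set.add s (g x)) := by
        rw [List.foldl_append, List.foldl_append]
        rw [pvAddAll_noop g t s h]
        rfl
      have hR : ((t ++ [x]) ++ r).foldl (fun acc p => PySem.Set.add acc (g p)) (PySem.Set.add s (g x))
          = r.foldl (fun acc p => PySem.Set.add acc (g p)) (PySem.Set.add s (g x)) := by
        rw [List.foldl_append, List.foldl_append]
        rw [pvAddAll_noop g t (PySem.Set.add s (g x))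
          (fun y hy => (PySem.Set.mem_add _ _ _).2 (Or.inl (h y hy)))]
        have : PySem.Set.add (PySem.Set.add s (g x)) (g x) = PySem.Set.add s (g x) := by
          by_cases hgs : g x ∈ s <;> simp [PySem.Set.add, hgs]
        simp only [List.foldl_cons, List.foldl_nil, this]
      rw [hr, hL, ← hR, ← hr]
      exact ih (t ++ [x]) (PySem.Set.add s (g x)) hsub
-- main loop-interchange lemma
theorem pvMain : ∀ (folds : List (String × Int)) (l : List (Int × Int)),
    folds.foldl (fun pts fold =>
        pts.foldl (fun new_points point =>
            PySem.Set.add new_points (pvStepA fold point)) PySem.Set.empty)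
      (PySem.Set.ofList l)
    = l.foldl (fun result p => PySem.Set.add result (pvThreadFolds p folds)) PySem.Set.empty := by
  intro folds
  induction folds with
  | nil => intro l; rfl
  | cons f fs ih =>
    intro l
    simp only [List.foldl_cons]
    have h1 : (PySem.Set.ofList l).foldl
        (fun new_points point => PySem.Set.add new_points (pvStepA f point)) PySem.Set.empty
        = l.foldl (fun acc p => PySem.Set.add acc (pvStepA f p)) PySem.Set.empty := by
      have := pvFold_dedup (pvStepA f) l [] [] (by intro x hx; cases hx)
      simpa [PySem.Set.ofList_eq_foldl, PySem.Set.empty] using this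
    have h2 : l.foldl (fun acc p => PySem.Set.add acc (pvStepA f p)) PySem.Set.empty
        = PySem.Set.ofList (l.map (pvStepA f)) := by
      rw [PySem.Set.ofList_eq_foldl, List.foldl_map]; rfl
    rw [h1, h2, ih (l.map (pvStepA f)), List.foldl_map]
    simp only [pvThread_cons]

-- ===== VERDICT (by name: the statement is the Claim_ definition above) =====
theorem simulate_folding_py_spec : Claim_equal_simulate_folding_py := by
  intro points folds _ _
  show simulate_folding_py points folds = simulate_folding_py_alt points folds
  have h : simulate_folding_py points folds =
      folds.foldl (fun pts fold =>
        pts.foldl (fun new_points point =>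
            PySem.Set.add new_points (pvStepA fold point)) PySem.Set.empty)
      (PySem.Set.ofList points) := rfl
  rw [h, pvMain]
  have := pvFold_dedup (fun p => pvThreadFolds p folds) points [] [] (by intro x hx; cases hx)
  show points.foldl (fun result p => PySem.Set.add result (pvThreadFolds p folds)) PySem.Set.empty
      = (PySem.Set.ofList points).foldl (fun result p => PySem.Set.add result (pvThreadFolds p folds)) PySem.Set.empty
  rw [PySem.Set.ofList_eq_foldl]
  exact this.symm
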